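-- pv_equiv track=rewrite | github.com/Juhyun22/Coding_Test | programmers/A로B만들기.py | solution
-- ===== SOURCE A (Python) =====
-- def solution(before, after):
--   list_before = list(before)
--   list_after = list(after)
--   for i in range(len(list_before)):
--     if list_before[i] in list_after:
--       list_after.remove(list_before[i])
--   if len(list_after):
--     return 0
--   else:
--     return 1
-- ===== SOURCE B (Python) =====
-- def solution(before, after):
--     lb = list(before)
--     la = list(after)
--     if all(lb.count(c) >= la.count(c) for c in set(la)):
--         return 1
--     return 0
-- ===== Notes on version B (the rewrite author's own statement) =====
-- stated objective: faster
-- what changed: Replaces A's destructive loop (for each char of before, a membership scan plus list.remove on a shrinking copy of after) with one count comparison per distinct character of after against before.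
import Mathlib
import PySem

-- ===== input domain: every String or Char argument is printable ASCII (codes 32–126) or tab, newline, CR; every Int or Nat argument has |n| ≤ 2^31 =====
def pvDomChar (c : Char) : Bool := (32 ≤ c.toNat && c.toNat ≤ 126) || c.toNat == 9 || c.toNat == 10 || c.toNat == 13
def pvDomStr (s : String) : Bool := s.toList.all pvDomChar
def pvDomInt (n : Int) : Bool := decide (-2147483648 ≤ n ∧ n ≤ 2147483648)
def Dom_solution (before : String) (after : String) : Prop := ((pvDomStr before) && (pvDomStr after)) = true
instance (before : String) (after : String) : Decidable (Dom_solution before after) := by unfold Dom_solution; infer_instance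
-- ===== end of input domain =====

-- B replaces A's destructive remove-loop with a per-distinct-character count comparison (idiomatic; return value only — A mutates only local copies).

-- ===== PORT A =====
-- one step of A's loop body: 'if list_before[i] in list_after: list_after.remove(list_before[i])'
def solutionStep (la : List Char) (b : Char) : List Char :=
  if la.contains b then (PySem.List.remove? la b).getD la else la

def solution (before : String) (after : String) : Int :=
  let list_before := before.toList
  let list_after := after.toList
  let list_after :=
    (PySem.List.pyRange 0 (list_before.length : Int) 1).foldl
      (fun s i => solutionStep s (PySem.List.pyGetD list_before i ' ')) list_after
  if list_after.length ≠ 0 then 0 else 1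

-- ===== PORT B =====
def solution_alt (before : String) (after : String) : Int :=
  let lb := before.toList
  let la := after.toList
  if (PySem.Set.ofList la).all (fun c => la.count c ≤ lb.count c) then 1 else 0

-- ===== PRECONDITION & SPEC =====
def Spec_solution (before : String) (after : String) (out : Int) : Prop := out = solution_alt before after
instance (before : String) (after : String) (out : Int) : Decidable (Spec_solution before after out) := by unfold Spec_solution; infer_instance

-- ===== CLAIM (what is proved, stated in full; the proofs are below) =====
def Claim_equal_solution : Prop := ∀ (before : String) (after : String), Dom_solution before after → Spec_solution before after (solution before after)

-- ===== LEMMAS AND PROOFS =====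

-- A's loop leaves, for each character c, max(0, s.count c - bs.count c) copies in the working list.
theorem solutionStep_count (s : List Char) (b c : Char) :
    (solutionStep s b).count c = s.count c - (if b = c then 1 else 0) := by
  unfold solutionStep
  by_cases hb : b ∈ s
  · rw [if_pos (by simpa using hb), PySem.List.remove?_eq_some_erase s b hb, Option.getD_some]
    by_cases hc : b = c
    · subst hc
      simp [List.count_erase_self]
    · simp [List.count_erase_of_ne (fun h => hc h.symm), hc]
  · rw [if_neg (by simpa using hb)]
    by_cases hc : b = c
    · subst hc
      simp [List.count_eq_zero_of_not_mem hb]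
    · simp [hc]

theorem foldl_step_count (bs : List Char) :
    ∀ (s : List Char) (c : Char),
      (bs.foldl solutionStep s).count c = s.count c - bs.count c := by
  induction bs with
  | nil => intro s c; simp
  | cons b bs ih =>
    intro s c
    rw [List.foldl_cons, ih, solutionStep_count, List.count_cons]
    by_cases hc : b = c
    · simp [hc]; omega
    · simp [hc]

-- ===== VERDICT (by name: the statement is the Claim_ definition above) =====
theorem solution_spec : Claim_equal_solution := by
  intro before after _
  unfold Spec_solution solution solution_alt
  simp only []
  rw [PySem.List.foldl_pyRange_zero_pyGetD' before.toList ' ' solutionStep after.toList]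
  set lb := before.toList
  set la := after.toList
  have hres : ∀ c, (lb.foldl solutionStep la).count c = la.count c - lb.count c :=
    fun c => foldl_step_count lb la c
  by_cases h : ∀ c ∈ la, la.count c ≤ lb.count c
  · have hempty : (lb.foldl solutionStep la).length = 0 := by
      rw [List.length_eq_zero_iff, List.eq_nil_iff_forall_not_mem]
      intro c hc
      have hmem : c ∈ la := by
        by_contra hla
        have : la.count c = 0 := List.count_eq_zero_of_not_mem hla
        have := hres c
        have hcpos : 0 < (lb.foldl solutionStep la).count c := List.count_pos_iff.mpr hc
        omega
      have := hres c
      have hcpos : 0 < (lb.foldl solutionStep la).count c := List.count_pos_iff.mpr hc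
      have := h c hmem
      omega
    have hall : (PySem.Set.ofList la).all (fun c => la.count c ≤ lb.count c) = true := by
      rw [List.all_eq_true]
      intro c hc
      exact decide_eq_true (h c ((PySem.Set.mem_ofList la c).mp hc))
    simp [hempty, hall]
  · push Not at h
    obtain ⟨c, hcla, hcnt⟩ := h
    have hne : (lb.foldl solutionStep la).length ≠ 0 := by
      intro hlen
      rw [List.length_eq_zero_iff] at hlen
      have := hres c
      rw [hlen] at this
      simp at this
      omega
    have hall : (PySem.Set.ofList la).all (fun c => la.count c ≤ lb.count c) = false := by
      rw [List.all_eq_false]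
      exact ⟨c, (PySem.Set.mem_ofList la c).mpr hcla, by simpa using hcnt⟩
    simp [hne, hall]
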